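-- pv_equiv track=rewrite | github.com/Halildeu/autonomous-orchestrator | scripts/run_managed_repo_onboarding_pipeline.py | _combine_status
-- ===== SOURCE A (Python) =====
-- from typing import Any
--
-- def _safe_status(raw: Any) -> str:
--     text = str(raw or "").strip().upper()
--     if text in {"OK", "WARN", "FAIL", "UNKNOWN", "UNVERIFIED"}:
--         return text
--     return "UNKNOWN"
--
-- def _combine_status(values: list[str]) -> str:
--     normalized = [_safe_status(v) for v in values if str(v or "").strip()]
--     if not normalized:
--         return "UNKNOWN"
--     if any(v == "FAIL" for v in normalized):
--         return "FAIL"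
--     if any(v in {"WARN", "UNVERIFIED", "UNKNOWN"} for v in normalized):
--         return "WARN"
--     return "OK"
-- ===== SOURCE B (Python) =====
-- def _combine_status(values: list) -> str:
--     # single severity-fold: track the maximum rank seen (OK=0, mid=1, FAIL=2), -1 = nothing seen
--     best = -1
--     for v in values:
--         s = str(v or "").strip()
--         if not s:
--             continue
--         t = s.upper()
--         r = 2 if t == "FAIL" else 0 if t == "OK" else 1
--         if best < r:
--             best = r
--     if best < 0:
--         return "UNKNOWN"
--     if best == 0:
--         return "OK"
--     if best == 1:
--         return "WARN"
--     return "FAIL"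
-- ===== Notes on version B (the rewrite author's own statement) =====
-- stated objective: alternative
-- what changed: Replaces the comprehension-plus-two-any()-scans with a single fold that maps each non-empty value to a severity rank (OK=0, WARN/UNVERIFIED/UNKNOWN/other=1, FAIL=2) and keeps the maximum, decoding the rank at the end.
import Mathlib
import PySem

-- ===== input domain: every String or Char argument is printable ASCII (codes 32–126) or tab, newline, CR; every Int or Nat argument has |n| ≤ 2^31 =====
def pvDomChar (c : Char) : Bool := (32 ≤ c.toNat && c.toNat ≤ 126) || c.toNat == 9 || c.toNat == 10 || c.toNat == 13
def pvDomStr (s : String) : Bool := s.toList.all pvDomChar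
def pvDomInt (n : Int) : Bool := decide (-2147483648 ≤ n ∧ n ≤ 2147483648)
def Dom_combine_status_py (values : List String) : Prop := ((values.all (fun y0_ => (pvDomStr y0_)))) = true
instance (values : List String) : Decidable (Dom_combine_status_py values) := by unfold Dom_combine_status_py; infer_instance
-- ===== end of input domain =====

-- B replaces A's comprehension plus two any() scans with a single max-severity fold; alternative decomposition, same cost.

-- ===== PORT A =====
-- _safe_status: str(raw or "").strip().upper(), recognized statuses pass through, else "UNKNOWN"
def safe_status (raw : String) : String :=
  let text := PySem.Str.upper (PySem.Str.strip raw)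
  if text = "OK" ∨ text = "WARN" ∨ text = "FAIL" ∨ text = "UNKNOWN" ∨ text = "UNVERIFIED" then
    text
  else "UNKNOWN"

def combine_status_py (values : List String) : String :=
  let normalized := (values.filter (fun v => PySem.Str.strip v ≠ "")).map safe_status
  if normalized = [] then "UNKNOWN"
  else if normalized.any (fun v => v == "FAIL") then "FAIL"
  else if normalized.any (fun v => v == "WARN" || v == "UNVERIFIED" || v == "UNKNOWN") then "WARN"
  else "OK"

-- ===== PORT B =====
-- one step of the severity fold from Source B
def altStep (best : Int) (v : String) : Int :=
  let s := PySem.Str.strip v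
  if s = "" then best
  else
    let t := PySem.Str.upper s
    let r : Int := if t = "FAIL" then 2 else if t = "OK" then 0 else 1
    if best < r then r else best

def combine_status_py_alt (values : List String) : String :=
  let best := values.foldl altStep (-1)
  if best < 0 then "UNKNOWN"
  else if best = 0 then "OK"
  else if best = 1 then "WARN"
  else "FAIL"

-- ===== PRECONDITION & SPEC =====
def Spec_combine_status_py (values : List String) (out : String) : Prop := out = combine_status_py_alt values
instance (values : List String) (out : String) : Decidable (Spec_combine_status_py values out) := by unfold Spec_combine_status_py; infer_instance

-- ===== CLAIM (what is proved, stated in full; the proofs are below) =====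
def Claim_equal_combine_status_py : Prop := ∀ (values : List String), Dom_combine_status_py values → Spec_combine_status_py values (combine_status_py values)

-- ===== LEMMAS AND PROOFS =====

-- the severity rank of one raw value (pvRank v = the r computed by altStep for a surviving v)
def pvRank (v : String) : Int :=
  if PySem.Str.upper (PySem.Str.strip v) = "FAIL" then 2
  else if PySem.Str.upper (PySem.Str.strip v) = "OK" then 0 else 1

lemma pvRank_bounds (v : String) : 0 ≤ pvRank v ∧ pvRank v ≤ 2 := by
  unfold pvRank; split_ifs <;> norm_num

-- zeta-expanded forms of the ports' bodies (definitional)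
lemma safe_status_eq (v : String) :
    safe_status v =
      (if PySem.Str.upper (PySem.Str.strip v) = "OK" ∨ PySem.Str.upper (PySem.Str.strip v) = "WARN" ∨
          PySem.Str.upper (PySem.Str.strip v) = "FAIL" ∨ PySem.Str.upper (PySem.Str.strip v) = "UNKNOWN" ∨
          PySem.Str.upper (PySem.Str.strip v) = "UNVERIFIED" then
        PySem.Str.upper (PySem.Str.strip v)
      else "UNKNOWN") := rfl

lemma combineA_eq (values : List String) :
    combine_status_py values =
      (if (values.filter (fun v => PySem.Str.strip v ≠ "")).map safe_status = [] then "UNKNOWN"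
       else if ((values.filter (fun v => PySem.Str.strip v ≠ "")).map safe_status).any (fun v => v == "FAIL") then "FAIL"
       else if ((values.filter (fun v => PySem.Str.strip v ≠ "")).map safe_status).any
           (fun v => v == "WARN" || v == "UNVERIFIED" || v == "UNKNOWN") then "WARN"
       else "OK") := rfl

lemma combineB_eq (values : List String) :
    combine_status_py_alt values =
      (if values.foldl altStep (-1) < 0 then "UNKNOWN"
       else if values.foldl altStep (-1) = 0 then "OK"
       else if values.foldl altStep (-1) = 1 then "WARN"
       else "FAIL") := rfl

lemma altStep_eq (b : Int) (v : String) :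
    altStep b v = if PySem.Str.strip v = "" then b else max b (pvRank v) := by
  show (if PySem.Str.strip v = "" then b
        else
          let r : Int := if PySem.Str.upper (PySem.Str.strip v) = "FAIL" then 2
            else if PySem.Str.upper (PySem.Str.strip v) = "OK" then 0 else 1
          if b < r then r else b) = _
  unfold pvRank
  by_cases h : PySem.Str.strip v = ""
  · simp [h]
  · simp only [if_neg h]
    split_ifs <;> omega

-- combined fold-max facts, one induction
lemma foldl_max_inv (L : List Int) : ∀ b : Int,
    b ≤ L.foldl max b ∧ (∀ x ∈ L, x ≤ L.foldl max b) ∧ (L.foldl max b = b ∨ L.foldl max b ∈ L) := by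
  induction L with
  | nil => intro b; exact ⟨le_refl b, fun x hx => absurd hx (List.not_mem_nil), Or.inl rfl⟩
  | cons a L ih =>
    intro b
    obtain ⟨h1, h2, h3⟩ := ih (max b a)
    simp only [List.foldl_cons]
    refine ⟨le_trans (le_max_left b a) h1, ?_, ?_⟩
    · intro x hx
      rcases List.mem_cons.mp hx with rfl | hx
      · exact le_trans (le_max_right b x) h1
      · exact h2 x hx
    · rcases h3 with h | h
      · rcases max_cases b a with ⟨he, _⟩ | ⟨he, _⟩
        · exact Or.inl (h.trans he)
        · exact Or.inr (by rw [h, he]; exact List.mem_cons_self)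
      · exact Or.inr (List.mem_cons_of_mem _ h)

-- the B fold equals the fold of max over the ranks of the surviving values
def pvRanks (values : List String) : List Int :=
  (values.filter (fun v => PySem.Str.strip v ≠ "")).map pvRank

lemma g_eq_fold_ranks (values : List String) :
    values.foldl altStep (-1) = (pvRanks values).foldl max (-1) := by
  unfold pvRanks
  have key : ∀ (l : List String) (b : Int),
      l.foldl altStep b = ((l.filter (fun v => PySem.Str.strip v ≠ "")).map pvRank).foldl max b := by
    intro l
    induction l with
    | nil => intro b; rfl
    | cons v l ih =>
      intro b
      by_cases h : PySem.Str.strip v = "" <;>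
        simp [List.foldl_cons, altStep_eq, h, ih]
  exact key values (-1)

-- per-element correspondence between safe_status and pvRank
lemma safe_fail_iff (v : String) : safe_status v = "FAIL" ↔ pvRank v = 2 := by
  rw [safe_status_eq]; unfold pvRank
  by_cases hF : PySem.Str.upper (PySem.Str.strip v) = "FAIL"
  · simp [hF]
  · by_cases hO : PySem.Str.upper (PySem.Str.strip v) = "OK"
    · simp [hO]
    · split_ifs with h
      · simp [hF]
      · simp

lemma safe_mid_iff (v : String) :
    (safe_status v = "WARN" ∨ safe_status v = "UNVERIFIED") ∨ safe_status v = "UNKNOWN" ↔ pvRank v = 1 := by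
  rw [safe_status_eq]; unfold pvRank
  by_cases hF : PySem.Str.upper (PySem.Str.strip v) = "FAIL"
  · simp [hF]
  · by_cases hO : PySem.Str.upper (PySem.Str.strip v) = "OK"
    · simp [hO]
    · rw [if_neg hF, if_neg hO]
      split_ifs with h
      · rcases h with h | h | h | h | h
        · exact absurd h hO
        · simp [h]
        · exact absurd h hF
        · simp [h]
        · simp [h]
      · simp

lemma ranks_all_bounds (values : List String) :
    ∀ x ∈ pvRanks values, 0 ≤ x ∧ x ≤ 2 := by
  intro x hx
  rcases List.mem_map.mp hx with ⟨v, _, rfl⟩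
  exact pvRank_bounds v

lemma main_eq (values : List String) :
    combine_status_py values = combine_status_py_alt values := by
  rw [combineA_eq, combineB_eq, g_eq_fold_ranks]
  obtain ⟨L, hL⟩ : ∃ L, pvRanks values = L := ⟨_, rfl⟩
  have hbnd : ∀ x ∈ L, 0 ≤ x ∧ x ≤ 2 := hL ▸ ranks_all_bounds values
  rw [hL]
  obtain ⟨M, hM⟩ : ∃ M, L.foldl max (-1) = M := ⟨_, rfl⟩
  obtain ⟨hge, hub, hmem⟩ := foldl_max_inv L (-1)
  rw [hM] at hge hub hmem
  have hnorm : (values.filter (fun v => PySem.Str.strip v ≠ "")).map safe_status = [] ↔ L = [] := by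
    rw [← hL]; unfold pvRanks
    simp
  have hanyF :
      ((values.filter (fun v => PySem.Str.strip v ≠ "")).map safe_status).any (fun v => v == "FAIL") = true
        ↔ (2 : Int) ∈ L := by
    rw [← hL]; unfold pvRanks
    simp only [List.any_map, List.any_eq_true, Function.comp, beq_iff_eq, List.mem_map]
    exact ⟨fun ⟨v, hv, hs⟩ => ⟨v, hv, (safe_fail_iff v).mp hs⟩,
      fun ⟨v, hv, hr⟩ => ⟨v, hv, (safe_fail_iff v).mpr hr⟩⟩
  have hanyW :
      ((values.filter (fun v => PySem.Str.strip v ≠ "")).map safe_status).any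
          (fun v => v == "WARN" || v == "UNVERIFIED" || v == "UNKNOWN") = true ↔ (1 : Int) ∈ L := by
    rw [← hL]; unfold pvRanks
    simp only [List.any_map, List.any_eq_true, Function.comp, Bool.or_eq_true, beq_iff_eq, List.mem_map]
    exact ⟨fun ⟨v, hv, hs⟩ => ⟨v, hv, (safe_mid_iff v).mp hs⟩,
      fun ⟨v, hv, hr⟩ => ⟨v, hv, (safe_mid_iff v).mpr hr⟩⟩
  rw [hM]
  by_cases hE : L = []
  · have hMm1 : M = -1 := by rw [← hM, hE]; rfl
    rw [if_pos (hnorm.mpr hE), hMm1]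
    norm_num
  · have hMnonneg : 0 ≤ M := by
      rcases List.exists_mem_of_ne_nil L hE with ⟨x, hx⟩
      exact le_trans (hbnd x hx).1 (hub x hx)
    have hMle2 : M ≤ 2 := by
      rcases hmem with h | h
      · omega
      · exact (hbnd M h).2
    rw [if_neg (fun h => hE (hnorm.mp h)), if_neg (show ¬ M < 0 by omega)]
    by_cases hF2 : (2 : Int) ∈ L
    · have hM2 : M = 2 := le_antisymm hMle2 (hub 2 hF2)
      rw [if_pos (hanyF.mpr hF2), hM2]
      norm_num
    · have hMne2 : M ≠ 2 := by
        intro h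
        rcases hmem with h' | h'
        · omega
        · exact hF2 (h ▸ h')
      rw [if_neg (fun h => hF2 (hanyF.mp h))]
      by_cases hW1 : (1 : Int) ∈ L
      · have hM1 : M = 1 := le_antisymm (by omega) (hub 1 hW1)
        rw [if_pos (hanyW.mpr hW1), hM1]
        norm_num
      · have hM0 : M = 0 := by
          rcases hmem with h' | h'
          · omega
          · have hb := hbnd M h'
            have h1 : M ≠ 1 := fun h => hW1 (h ▸ h')
            have h2 : M ≠ 2 := fun h => hF2 (h ▸ h')
            omega
        rw [if_neg (fun h => hW1 (hanyW.mp h)), hM0]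
        norm_num

-- ===== VERDICT (by name: the statement is the Claim_ definition above) =====
theorem combine_status_py_spec : Claim_equal_combine_status_py := by
  intro values _
  unfold Spec_combine_status_py
  exact main_eq values
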